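-- pv_equiv track=rewrite | github.com/susobhang70/mod_uttt | team27.py | __get_valid_blocks
-- ===== SOURCE A (Python) =====
-- def __get_valid_blocks(previous_move, block):
-- 	allowed_blocks = []
-- 	if previous_move[0] % 3 == 0 and previous_move[1] % 3 == 0:
-- 		allowed_blocks = [1, 3]
-- 	elif previous_move[0] % 3 == 0 and previous_move[1] % 3 == 2:
-- 		allowed_blocks = [1, 5]
-- 	elif previous_move[0] % 3 == 2 and previous_move[1] % 3 == 0:
-- 		allowed_blocks = [3, 7]
-- 	elif previous_move[0] % 3 == 2 and previous_move[1] % 3 == 2: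
-- 		allowed_blocks = [5, 7]
-- 	elif previous_move[0] % 3 == 0 and previous_move[1] % 3 == 1:
-- 		allowed_blocks = [0, 2]
-- 	elif previous_move[0] % 3 == 1 and previous_move[1] % 3 == 0:
-- 		allowed_blocks = [0, 6]
-- 	elif previous_move[0] % 3 == 2 and previous_move[1] % 3 == 1:
-- 		allowed_blocks = [6, 8]
-- 	elif previous_move[0] % 3 == 1 and previous_move[1] % 3 == 2:
-- 		allowed_blocks = [2, 8]
-- 	elif previous_move[0] % 3 == 1 and previous_move[1] % 3 == 1:
-- 		allowed_blocks = [4]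
--
-- 	valid_blocks = []
-- 	for i in allowed_blocks:
-- 		if block[i] == '-':
-- 			valid_blocks.append(i)
-- 	return valid_blocks
-- ===== SOURCE B (Python) =====
-- def _allowed(r, c, b):
-- 	# Geometric rule: block b (as cell (b//3, b%3)) is reachable from residue cell (r, c)
-- 	# iff the two cells are orthogonal neighbours and neither is the centre,
-- 	# or both are the centre cell (1, 1).
-- 	br, bc = divmod(b, 3)
-- 	if b == 4:
-- 		return r == 1 and c == 1
-- 	return not (r == 1 and c == 1) and abs(br - r) + abs(bc - c) == 1
--
-- def __get_valid_blocks(previous_move, block):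
-- 	r, c = previous_move[0] % 3, previous_move[1] % 3
-- 	valid_blocks = []
-- 	for b in range(9):
-- 		if _allowed(r, c, b) and block[b] == '-':
-- 			valid_blocks.append(b)
-- 	return valid_blocks
-- ===== Notes on version B (the rewrite author's own statement) =====
-- stated objective: alternative
-- what changed: Instead of dispatching on nine (r%3,c%3) cases to pick a hard-coded block list, B scans all 9 blocks and keeps those that satisfy an arithmetic adjacency rule (the block cell is an orthogonal neighbour of the residue cell with the centre excluded, or both are the centre) and whose cell is '-'.
import Mathlib
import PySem

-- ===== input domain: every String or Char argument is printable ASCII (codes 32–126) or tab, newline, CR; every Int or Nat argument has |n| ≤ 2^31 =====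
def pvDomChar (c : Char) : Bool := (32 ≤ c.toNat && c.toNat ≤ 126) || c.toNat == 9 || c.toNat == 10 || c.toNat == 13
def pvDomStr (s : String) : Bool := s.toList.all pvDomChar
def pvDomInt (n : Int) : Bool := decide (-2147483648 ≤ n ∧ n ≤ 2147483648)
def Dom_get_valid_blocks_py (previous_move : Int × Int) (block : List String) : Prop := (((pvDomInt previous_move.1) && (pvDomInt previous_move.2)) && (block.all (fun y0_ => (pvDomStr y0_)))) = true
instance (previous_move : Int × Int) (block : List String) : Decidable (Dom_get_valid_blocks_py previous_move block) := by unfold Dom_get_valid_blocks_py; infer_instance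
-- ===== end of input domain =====

-- B replaces A's nine-branch dispatch with a scan of all 9 blocks using an arithmetic adjacency
-- rule (orthogonal neighbour, centre excluded; centre maps to itself) — alternative, same cost.


-- ===== PORT A =====
def get_valid_blocks_py (previous_move : Int × Int) (block : List String) : List Int :=
  let allowed_blocks : List Int :=
    if PySem.Int.mod previous_move.1 3 == 0 && PySem.Int.mod previous_move.2 3 == 0 then [1, 3]
    else if PySem.Int.mod previous_move.1 3 == 0 && PySem.Int.mod previous_move.2 3 == 2 then [1, 5]
    else if PySem.Int.mod previous_move.1 3 == 2 && PySem.Int.mod previous_move.2 3 == 0 then [3, 7]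
    else if PySem.Int.mod previous_move.1 3 == 2 && PySem.Int.mod previous_move.2 3 == 2 then [5, 7]
    else if PySem.Int.mod previous_move.1 3 == 0 && PySem.Int.mod previous_move.2 3 == 1 then [0, 2]
    else if PySem.Int.mod previous_move.1 3 == 1 && PySem.Int.mod previous_move.2 3 == 0 then [0, 6]
    else if PySem.Int.mod previous_move.1 3 == 2 && PySem.Int.mod previous_move.2 3 == 1 then [6, 8]
    else if PySem.Int.mod previous_move.1 3 == 1 && PySem.Int.mod previous_move.2 3 == 2 then [2, 8]
    else if PySem.Int.mod previous_move.1 3 == 1 && PySem.Int.mod previous_move.2 3 == 1 then [4]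
    else []
  -- the for-loop with append; block[i] raises outside Pre_ (pyGet? = none there)
  allowed_blocks.foldl
    (fun valid_blocks i =>
      if PySem.List.pyGet? block i == some "-" then valid_blocks ++ [i] else valid_blocks) []

-- ===== PORT B =====
-- _allowed(r, c, b): block cell (b//3, b%3) is an orthogonal neighbour of (r, c) with the
-- centre excluded, or both are the centre (b == 4 ∧ (r, c) = (1, 1)).
def pvAllowed (r c b : Int) : Bool :=
  let br := PySem.Int.floordiv b 3
  let bc := PySem.Int.mod b 3
  if b == 4 then r == 1 && c == 1
  else !(r == 1 && c == 1) && ((br - r).natAbs + (bc - c).natAbs == 1)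

def get_valid_blocks_py_alt (previous_move : Int × Int) (block : List String) : List Int :=
  let r := PySem.Int.mod previous_move.1 3
  let c := PySem.Int.mod previous_move.2 3
  (PySem.List.pyRange 0 9 1).foldl
    (fun valid_blocks b =>
      if pvAllowed r c b && (PySem.List.pyGet? block b == some "-") then valid_blocks ++ [b]
      else valid_blocks) []

-- ===== PRECONDITION & SPEC =====
-- Pre_ excludes exactly the inputs where A raises IndexError: some allowed block index
-- (determined by the residues (r%3, c%3)) is not below len(block).
def Pre_get_valid_blocks_py (previous_move : Int × Int) (block : List String) : Prop :=
  ∀ b ∈ PySem.List.pyRange 0 9 1,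
    pvAllowed (PySem.Int.mod previous_move.1 3) (PySem.Int.mod previous_move.2 3) b = true →
      b < (block.length : Int)
instance (previous_move : Int × Int) (block : List String) : Decidable (Pre_get_valid_blocks_py previous_move block) := by unfold Pre_get_valid_blocks_py; infer_instance

def pvWitness_get_valid_blocks_py : (Int × Int) × List String :=
  ((4, 7), ["-", "x", "-", "-", "-", "o", "-", "-", "-"])

def Spec_get_valid_blocks_py (previous_move : Int × Int) (block : List String) (out : List Int) : Prop := out = get_valid_blocks_py_alt previous_move block
instance (previous_move : Int × Int) (block : List String) (out : List Int) : Decidable (Spec_get_valid_blocks_py previous_move block out) := by unfold Spec_get_valid_blocks_py; infer_instance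

-- ===== CLAIM (what is proved, stated in full; the proofs are below) =====
def Claim_equal_get_valid_blocks_py : Prop := ∀ (previous_move : Int × Int) (block : List String), Dom_get_valid_blocks_py previous_move block → Pre_get_valid_blocks_py previous_move block → Spec_get_valid_blocks_py previous_move block (get_valid_blocks_py previous_move block)

-- ===== LEMMAS AND PROOFS =====

-- both append-loops are filters of the lists they traverse
lemma pvFoldA (block : List String) (l : List Int) :
    l.foldl (fun valid_blocks i =>
        if PySem.List.pyGet? block i == some "-" then valid_blocks ++ [i] else valid_blocks) []
      = l.filter (fun i => PySem.List.pyGet? block i == some "-") := by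
  simpa using PySem.List.foldl_append_if
    (p := fun i => PySem.List.pyGet? block i == some "-") (f := id) (l := l) (acc := [])

lemma pvFoldB (block : List String) (r c : Int) (l : List Int) :
    l.foldl (fun valid_blocks b =>
        if pvAllowed r c b && (PySem.List.pyGet? block b == some "-") then valid_blocks ++ [b]
        else valid_blocks) []
      = (l.filter (fun b => pvAllowed r c b)).filter
          (fun b => PySem.List.pyGet? block b == some "-") := by
  rw [List.filter_filter]
  simpa [Bool.and_comm] using PySem.List.foldl_append_if
    (p := fun b => pvAllowed r c b && (PySem.List.pyGet? block b == some "-"))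
    (f := id) (l := l) (acc := [])

-- A's branch cascade selects exactly the blocks B's adjacency rule admits, per residue pair
lemma pvBranchScan (a b : Int) :
    (if PySem.Int.mod a 3 == 0 && PySem.Int.mod b 3 == 0 then ([1, 3] : List Int)
     else if PySem.Int.mod a 3 == 0 && PySem.Int.mod b 3 == 2 then [1, 5]
     else if PySem.Int.mod a 3 == 2 && PySem.Int.mod b 3 == 0 then [3, 7]
     else if PySem.Int.mod a 3 == 2 && PySem.Int.mod b 3 == 2 then [5, 7]
     else if PySem.Int.mod a 3 == 0 && PySem.Int.mod b 3 == 1 then [0, 2]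
     else if PySem.Int.mod a 3 == 1 && PySem.Int.mod b 3 == 0 then [0, 6]
     else if PySem.Int.mod a 3 == 2 && PySem.Int.mod b 3 == 1 then [6, 8]
     else if PySem.Int.mod a 3 == 1 && PySem.Int.mod b 3 == 2 then [2, 8]
     else if PySem.Int.mod a 3 == 1 && PySem.Int.mod b 3 == 1 then [4]
     else [])
    = (PySem.List.pyRange 0 9 1).filter
        (fun i => pvAllowed (PySem.Int.mod a 3) (PySem.Int.mod b 3) i) := by
  have ha1 : 0 ≤ PySem.Int.mod a 3 := PySem.Int.mod_nonneg a (by norm_num)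
  have ha2 : PySem.Int.mod a 3 < 3 := PySem.Int.mod_lt a (by norm_num)
  have hb1 : 0 ≤ PySem.Int.mod b 3 := PySem.Int.mod_nonneg b (by norm_num)
  have hb2 : PySem.Int.mod b 3 < 3 := PySem.Int.mod_lt b (by norm_num)
  set r := PySem.Int.mod a 3 with hr
  set c := PySem.Int.mod b 3 with hc
  have hrc : (r = 0 ∨ r = 1 ∨ r = 2) ∧ (c = 0 ∨ c = 1 ∨ c = 2) := by omega
  rcases hrc with ⟨h1 | h1 | h1, h2 | h2 | h2⟩ <;>
    rw [show r = _ from h1, show c = _ from h2] <;> decide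

-- ===== VERDICT (by name: the statement is the Claim_ definition above) =====
theorem get_valid_blocks_py_spec : Claim_equal_get_valid_blocks_py := by
  intro pm block _ _
  unfold Spec_get_valid_blocks_py get_valid_blocks_py get_valid_blocks_py_alt
  rw [pvFoldA, pvFoldB, pvBranchScan]
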